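-- pv_equiv track=rewrite | github.com/bArryAllen6843/Data-Structure-and-Algorithm | Practise/1.py | magicalSubarrays
-- ===== SOURCE A (Python) =====
-- def magicalSubarrays(n: int, arr) -> int:
--     cnt = 0
--     for i in range(n):
--         for j in range(i, n):
--             sub_arr = arr[i:j + 1]
--             odd_cnt = 0
--             for num in sub_arr:
--                 if num % 2 != 0:
--                     odd_cnt += 1
--
--             if odd_cnt % 2 == 0 and odd_cnt!=0:
--                 cnt += 1
--     return cnt
-- ===== SOURCE B (Python) =====
-- def magicalSubarrays(n: int, arr) -> int:
--     # One pass over the first n elements. A subarray has an even odd-count iff its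
--     # endpoints' prefix parities match, so pair up equal-parity prefixes; subtract
--     # the subarrays with no odd element at all (counted via the current all-even run).
--     parity = 0        # parity of odd elements seen so far
--     run = 0           # length of the current all-even run
--     pref = [1, 0]     # prefixes seen with odd-count parity 0 / 1 (empty prefix included)
--     even_pairs = 0    # subarrays whose odd-count is even (zero included)
--     all_even = 0      # subarrays containing no odd element
--     for i, x in enumerate(arr):
--         if i >= n:
--             break
--         if x % 2 != 0:
--             parity = 1 - parity
--             run = 0
--         else:
--             run += 1
--             all_even += run
--         even_pairs += pref[parity]
--         pref[parity] += 1
--     return even_pairs - all_even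
-- ===== Notes on version B (the rewrite author's own statement) =====
-- stated objective: faster
-- what changed: Replaced the triple loop (all O(n^2) subarrays, each scanned for odd elements) by a single pass over the first n elements maintaining prefix-parity counts and the current all-even run: answer = #even-odd-count subarrays minus #all-even subarrays.
-- intended difference: When n exceeds len(arr) and some suffix of arr has an even nonzero count of odd elements, A's clamped slices make it count each such full suffix once per extra index pair, returning an inflated count, while B counts every subarray of the first min(n,len(arr)) elements exactly once, which is the intended value. — e.g. on magicalSubarrays(3, [1, 1]): A returns 2, B returns 1
import Mathlib
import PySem

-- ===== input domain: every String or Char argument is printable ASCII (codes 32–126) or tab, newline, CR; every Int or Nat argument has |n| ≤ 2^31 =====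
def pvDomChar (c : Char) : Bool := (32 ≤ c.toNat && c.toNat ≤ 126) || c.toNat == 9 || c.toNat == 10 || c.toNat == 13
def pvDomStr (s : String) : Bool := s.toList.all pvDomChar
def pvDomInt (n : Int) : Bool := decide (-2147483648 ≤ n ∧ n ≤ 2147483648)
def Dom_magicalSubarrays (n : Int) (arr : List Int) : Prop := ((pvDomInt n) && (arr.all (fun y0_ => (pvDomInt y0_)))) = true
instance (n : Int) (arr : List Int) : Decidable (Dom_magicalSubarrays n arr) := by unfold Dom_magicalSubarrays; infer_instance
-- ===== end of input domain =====

-- B replaces A's triple loop over all subarrays by a single pass over the first n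
-- elements keeping prefix-parity counts and the current all-even run (answer =
-- even-parity subarrays minus all-even subarrays); for n > len(arr) A double counts
-- clamped full suffixes and B returns the intended count (see D_ below).


-- ===== PORT A =====
def magicalSubarrays (n : Int) (arr : List Int) : Int :=
  (PySem.List.pyRange 0 n 1).foldl (fun cnt i =>
    (PySem.List.pyRange i n 1).foldl (fun cnt j =>
      let subArr := PySem.List.slice arr (some i) (some (j + 1))
      let oddCnt := subArr.foldl
        (fun oddCnt num => if PySem.Int.mod num 2 ≠ 0 then oddCnt + 1 else oddCnt) (0 : Int)
      if PySem.Int.mod oddCnt 2 = 0 ∧ oddCnt ≠ 0 then cnt + 1 else cnt) cnt) 0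

-- ===== PORT B =====
-- state: (parity, run, c0, c1, even_pairs, all_even); pref = [c0, c1]
def magicalSubarraysAltStep (s : Int × Int × Int × Int × Int × Int) (x : Int) :
    Int × Int × Int × Int × Int × Int :=
  match s with
  | (parity, run, c0, c1, evenPairs, allEven) =>
    let (parity, run, allEven) :=
      if PySem.Int.mod x 2 ≠ 0 then (1 - parity, (0 : Int), allEven)
      else (parity, run + 1, allEven + (run + 1))
    if parity = 0 then (parity, run, c0 + 1, c1, evenPairs + c0, allEven)
    else (parity, run, c0, c1 + 1, evenPairs + c1, allEven)

-- the 'for i, x in enumerate(arr): if i >= n: break; …' loop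
def magicalSubarraysAltLoop (n : Int) :
    List Int → Int → (Int × Int × Int × Int × Int × Int) → Int × Int × Int × Int × Int × Int
  | [], _, s => s
  | x :: xs, i, s =>
    if i ≥ n then s else magicalSubarraysAltLoop n xs (i + 1) (magicalSubarraysAltStep s x)

def magicalSubarrays_alt (n : Int) (arr : List Int) : Int :=
  let s := magicalSubarraysAltLoop n arr 0 (0, 0, 1, 0, 0, 0)
  s.2.2.2.2.1 - s.2.2.2.2.2

-- ===== PRECONDITION & SPEC =====
-- number of odd elements of a list (used by D_ and the proofs)
def pvOc (l : List Int) : Nat := l.countP (fun x => decide (PySem.Int.mod x 2 ≠ 0))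

-- When n exceeds len(arr) and some suffix of arr has an even nonzero count of odd
-- elements, A's clamped slices count each such full suffix once per extra index pair
-- (an inflated value), while B counts every subarray of the first min(n, len(arr))
-- elements exactly once, which is the intended value.
def D_magicalSubarrays (n : Int) (arr : List Int) : Prop :=
  n > (arr.length : Int) ∧ ∃ i < arr.length, pvOc (arr.drop i) % 2 = 0 ∧ pvOc (arr.drop i) ≠ 0
instance (n : Int) (arr : List Int) : Decidable (D_magicalSubarrays n arr) := by
  unfold D_magicalSubarrays; infer_instance

def Spec_magicalSubarrays (n : Int) (arr : List Int) (out : Int) : Prop :=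
  ¬ D_magicalSubarrays n arr → out = magicalSubarrays_alt n arr
instance (n : Int) (arr : List Int) (out : Int) : Decidable (Spec_magicalSubarrays n arr out) := by unfold Spec_magicalSubarrays; infer_instance

def pvDiffWitness_magicalSubarrays : Int × List Int := (3, [1, 1])
def pvDiffWitnessOut_magicalSubarrays : Int × Int := (2, 1)

-- ===== CLAIM (what is proved, stated in full; the proofs are below) =====
def Claim_unchanged_magicalSubarrays : Prop := ∀ (n : Int) (arr : List Int), Dom_magicalSubarrays n arr → Spec_magicalSubarrays n arr (magicalSubarrays n arr)
def Claim_changed_magicalSubarrays : Prop := Dom_magicalSubarrays (pvDiffWitness_magicalSubarrays.1) (pvDiffWitness_magicalSubarrays.2) ∧ D_magicalSubarrays (pvDiffWitness_magicalSubarrays.1) (pvDiffWitness_magicalSubarrays.2) ∧ magicalSubarrays (pvDiffWitness_magicalSubarrays.1) (pvDiffWitness_magicalSubarrays.2) = pvDiffWitnessOut_magicalSubarrays.1 ∧ magicalSubarrays_alt (pvDiffWitness_magicalSubarrays.1) (pvDiffWitness_magicalSubarrays.2) = pvDiffWitnessOut_magicalSubarrays.2 ∧ pvDiffWitnessOut_magicalSubarrays.1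 ≠ pvDiffWitnessOut_magicalSubarrays.2
def Claim_exact_magicalSubarrays : Prop := ∀ (n : Int) (arr : List Int), Dom_magicalSubarrays n arr → D_magicalSubarrays n arr → magicalSubarrays n arr ≠ magicalSubarrays_alt n arr

-- ===== LEMMAS AND PROOFS =====

-- parity of the number of odd elements
def pvPar (l : List Int) : Nat := pvOc l % 2
-- length of the maximal all-even suffix
def pvRun (l : List Int) : Nat :=
  (l.reverse.takeWhile (fun x => decide (PySem.Int.mod x 2 = 0))).length
-- number of prefixes (empty included) whose odd-count has parity p
def pvPc (p : Nat) (l : List Int) : Nat :=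
  ∑ i ∈ Finset.range (l.length + 1), if pvPar (l.take i) = p then 1 else 0
-- number of subarrays with an even number of odds (zero included)
def pvEp (l : List Int) : Nat :=
  ∑ j ∈ Finset.range (l.length + 1), ∑ i ∈ Finset.range j,
    if pvPar (l.take i) = pvPar (l.take j) then 1 else 0
-- number of subarrays with no odd element
def pvZo (l : List Int) : Nat :=
  ∑ j ∈ Finset.range (l.length + 1), ∑ i ∈ Finset.range j,
    if pvOc ((l.take j).drop i) = 0 then 1 else 0
-- A's count: subarrays with an even, nonzero number of odds
def pvCntA (l : List Int) : Nat :=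
  ∑ j ∈ Finset.range (l.length + 1), ∑ i ∈ Finset.range j,
    if pvOc ((l.take j).drop i) % 2 = 0 ∧ pvOc ((l.take j).drop i) ≠ 0 then 1 else 0
-- number of qualifying full suffixes
def pvS (l : List Int) : Nat :=
  ∑ i ∈ Finset.range l.length,
    if pvOc (l.drop i) % 2 = 0 ∧ pvOc (l.drop i) ≠ 0 then 1 else 0

lemma pvOc_append (l₁ l₂ : List Int) : pvOc (l₁ ++ l₂) = pvOc l₁ + pvOc l₂ := by
  simp [pvOc, List.countP_append]

lemma pvPar_lt_two (l : List Int) : pvPar l < 2 := Nat.mod_lt _ (by norm_num)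

lemma pvOc_take_drop (t : List Int) (i : Nat) : pvOc (t.take i) + pvOc (t.drop i) = pvOc t := by
  rw [← pvOc_append, List.take_append_drop]

-- a suffix subarray has an even odd-count iff the two prefix parities match
lemma pvEven_iff (t : List Int) (i : Nat) :
    (pvOc (t.drop i) % 2 = 0) ↔ pvPar (t.take i) = pvPar t := by
  have h := pvOc_take_drop t i
  unfold pvPar
  omega

-- number of nonempty all-even suffixes = length of the maximal all-even suffix
lemma pvZcount (t : List Int) :
    (∑ i ∈ Finset.range t.length, if pvOc (t.drop i) = 0 then 1 else 0) = pvRun t := by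
  induction t using List.reverseRecOn with
  | nil => simp [pvRun]
  | append_singleton l x ih =>
    rcases Decidable.em (PySem.Int.mod x 2 = 0) with hx | hx
    · have hd : (2 : Int) ∣ x := (PySem.Int.mod_eq_zero_iff_dvd x 2).mp hx
      have hrun : pvRun (l ++ [x]) = pvRun l + 1 := by
        unfold pvRun; rw [List.reverse_append]; simp [hd]
      have hx0 : pvOc [x] = 0 := by unfold pvOc; simp [hd]
      rw [hrun, ← ih]
      have hlen : (l ++ [x]).length = l.length + 1 := by simp
      rw [hlen, Finset.sum_range_succ]
      have hlast : (l ++ [x]).drop l.length = [x] := by simp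
      rw [hlast, if_pos hx0]
      congr 1
      apply Finset.sum_congr rfl
      intro i hi
      have hi' : i ≤ l.length := le_of_lt (Finset.mem_range.mp hi)
      rw [List.drop_append_of_le_length hi', pvOc_append, hx0, Nat.add_zero]
    · have hd : ¬ (2 : Int) ∣ x := fun h => hx ((PySem.Int.mod_eq_zero_iff_dvd x 2).mpr h)
      have hm1 : x % 2 = 1 := by
        have := Int.emod_two_eq x
        rcases this with h | h
        · exact absurd (Int.dvd_of_emod_eq_zero h) hd
        · exact h
      have hrun : pvRun (l ++ [x]) = 0 := by
        unfold pvRun; rw [List.reverse_append]; simp [hm1]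
      have hx1 : pvOc [x] = 1 := by unfold pvOc; simp [hm1]
      rw [hrun]
      apply Finset.sum_eq_zero
      intro i hi
      have hi' : i ≤ l.length := by
        have := Finset.mem_range.mp hi; simp at this; omega
      rw [List.drop_append_of_le_length hi', pvOc_append, hx1]
      simp

-- countP over a range as a Finset sum
lemma pvCountP_range (p : Nat → Bool) (n : Nat) :
    List.countP p (List.range n) = ∑ i ∈ Finset.range n, if p i then 1 else 0 := by
  induction n with
  | zero => simp
  | succ n ih => rw [List.range_succ, List.countP_append, Finset.sum_range_succ, ih]; simp [List.countP_cons]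

-- triangle sum swap: group by left end vs group by right end
lemma pvTriangle (f : Nat → Nat → Nat) (n : Nat) :
    (∑ i ∈ Finset.range n, ∑ k ∈ Finset.range (n - i), f i (i + k + 1))
      = ∑ j ∈ Finset.range (n + 1), ∑ i ∈ Finset.range j, f i j := by
  induction n with
  | zero => simp
  | succ n ih =>
    have hstep : ∀ i ∈ Finset.range (n + 1),
        (∑ k ∈ Finset.range (n + 1 - i), f i (i + k + 1))
          = (∑ k ∈ Finset.range (n - i), f i (i + k + 1)) + f i (n + 1) := by
      intro i hi
      have hi' : i ≤ n := by have := Finset.mem_range.mp hi; omega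
      have h1 : n + 1 - i = (n - i) + 1 := by omega
      rw [h1, Finset.sum_range_succ]
      congr 2
      omega
    rw [Finset.sum_congr rfl hstep, Finset.sum_add_distrib, Finset.sum_range_succ (fun i => ∑ k ∈ Finset.range (n - i), f i (i + k + 1))]
    simp only [Nat.sub_self, Finset.range_zero, Finset.sum_empty, Nat.add_zero]
    rw [ih, Finset.sum_range_succ (fun j => ∑ i ∈ Finset.range j, f i j) (n + 1)]

-- A's odd-counting loop is the odd count
lemma pvOddFold (sub : List Int) :
    sub.foldl (fun o num => if PySem.Int.mod num 2 ≠ 0 then o + 1 else o) (0 : Int)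
      = (pvOc sub : Int) := by
  rw [show (fun (o : Int) num => if PySem.Int.mod num 2 ≠ 0 then o + 1 else o)
        = (fun (o : Int) num => if (fun x => decide (PySem.Int.mod x 2 ≠ 0)) num = true then o + 1 else o) from by
    funext o num; simp]
  rw [PySem.List.foldl_count_if, zero_add, pvOc]

lemma pvCond_cast (u : Nat) :
    (PySem.Int.mod (u : Int) 2 = 0 ∧ (u : Int) ≠ 0) ↔ (u % 2 = 0 ∧ u ≠ 0) := by
  rw [PySem.Int.mod_eq_emod_of_pos (by norm_num)]
  omega

lemma pvListSumCast (g : Nat → Nat) (n : Nat) :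
    ((List.range n).map (fun i => ((g i : Nat) : Int))).sum
      = ((∑ i ∈ Finset.range n, g i : Nat) : Int) := by
  induction n with
  | zero => simp
  | succ n ih =>
    rw [List.range_succ, List.map_append, List.sum_append, ih, Finset.sum_range_succ]
    push_cast
    simp

-- indicator of A's condition on the subarray of length k+1 starting at i
def pvInd (arr : List Int) (i k : Nat) : Nat :=
  if pvOc ((arr.drop i).take (k + 1)) % 2 = 0 ∧ pvOc ((arr.drop i).take (k + 1)) ≠ 0 then 1 else 0

-- A's port is the double sum of indicators, for any nonnegative bound
lemma pvA_sum (arr : List Int) (N : Nat) :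
    magicalSubarrays (N : Int) arr
      = ((∑ i ∈ Finset.range N, ∑ k ∈ Finset.range (N - i), pvInd arr i k : Nat) : Int) := by
  unfold magicalSubarrays
  rw [PySem.List.pyRange_zero_natCast N, List.foldl_map]
  have hcong : ∀ (cnt : Int), ∀ i ∈ List.range N,
      (PySem.List.pyRange (i : Int) (N : Int) 1).foldl (fun cnt j =>
        let subArr := PySem.List.slice arr (some (i : Int)) (some (j + 1))
        let oddCnt := subArr.foldl
          (fun oddCnt num => if PySem.Int.mod num 2 ≠ 0 then oddCnt + 1 else oddCnt) (0 : Int)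
        if PySem.Int.mod oddCnt 2 = 0 ∧ oddCnt ≠ 0 then cnt + 1 else cnt) cnt
      = cnt + ((∑ k ∈ Finset.range (N - i), pvInd arr i k : Nat) : Int) := by
    intro cnt i hi
    have hi' : i < N := List.mem_range.mp hi
    rw [PySem.List.pyRange_one (i : Int) (N : Int)]
    rw [show (((N : Int) - (i : Int)).toNat) = N - i from by omega]
    rw [List.foldl_map]
    have hinner : ∀ (cnt : Int), ∀ k ∈ List.range (N - i),
        (let subArr := PySem.List.slice arr (some (i : Int)) (some ((i : Int) + (k : Int) + 1))
         let oddCnt := subArr.foldl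
           (fun oddCnt num => if PySem.Int.mod num 2 ≠ 0 then oddCnt + 1 else oddCnt) (0 : Int)
         if PySem.Int.mod oddCnt 2 = 0 ∧ oddCnt ≠ 0 then cnt + 1 else cnt)
        = (if (fun k => decide (pvOc ((arr.drop i).take (k + 1)) % 2 = 0 ∧ pvOc ((arr.drop i).take (k + 1)) ≠ 0)) k = true
           then cnt + 1 else cnt) := by
      intro cnt k _
      have hslice : PySem.List.slice arr (some (i : Int)) (some ((i : Int) + (k : Int) + 1))
          = (arr.drop i).take (k + 1) := by
        rw [show ((i : Int) + (k : Int) + 1) = ((i : Int) + ((k + 1 : Nat) : Int)) from by push_cast; ring]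
        exact PySem.List.slice_natCast_add arr i (k + 1)
      simp only [hslice, pvOddFold]
      rw [if_congr (pvCond_cast (pvOc ((arr.drop i).take (k + 1)))) rfl rfl]
      simp [decide_eq_true_eq]
    rw [PySem.List.foldl_congr_mem _ _ _ cnt hinner, PySem.List.foldl_count_if, pvCountP_range]
    congr 1
    push_cast
    apply Finset.sum_congr rfl
    intro k _
    simp [pvInd, decide_eq_true_eq]
  rw [PySem.List.foldl_congr_mem _ _
        (fun (cnt : Int) (i : Nat) => cnt + ((∑ k ∈ Finset.range (N - i), pvInd arr i k : Nat) : Int)) 0 hcong]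
  rw [PySem.List.foldl_add, zero_add]
  exact pvListSumCast _ _

-- for N within the list, the double sum is pvCntA of the length-N prefix
lemma pvSum_le (arr : List Int) (N : Nat) (h : N ≤ arr.length) :
    (∑ i ∈ Finset.range N, ∑ k ∈ Finset.range (N - i), pvInd arr i k) = pvCntA (arr.take N) := by
  have hdt : ∀ i k : Nat, i + k + 1 ≤ N →
      (arr.drop i).take (k + 1) = ((arr.take N).take (i + k + 1)).drop i := by
    intro i k hik
    rw [List.take_take, show min (i + k + 1) N = i + k + 1 from by omega, List.drop_take]
    congr 1
    omega
  have hlen : (arr.take N).length = N := by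
    rw [List.length_take]; omega
  calc (∑ i ∈ Finset.range N, ∑ k ∈ Finset.range (N - i), pvInd arr i k)
      = ∑ i ∈ Finset.range N, ∑ k ∈ Finset.range (N - i),
          (if pvOc (((arr.take N).take (i + k + 1)).drop i) % 2 = 0
              ∧ pvOc (((arr.take N).take (i + k + 1)).drop i) ≠ 0 then 1 else 0 : Nat) := by
        apply Finset.sum_congr rfl; intro i hi
        apply Finset.sum_congr rfl; intro k hk
        have hi' : i < N := Finset.mem_range.mp hi
        have hk' : k < N - i := Finset.mem_range.mp hk
        simp only [pvInd, hdt i k (by omega)]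
    _ = pvCntA (arr.take N) := by
        have hh := pvTriangle (fun i j =>
          if pvOc (((arr.take N).take j).drop i) % 2 = 0
            ∧ pvOc (((arr.take N).take j).drop i) ≠ 0 then 1 else 0) N
        unfold pvCntA
        rw [hlen]
        exact hh

-- vanishing indicators past the end of the list
lemma pvInd_zero (arr : List Int) (i k : Nat) (h : arr.length ≤ i) : pvInd arr i k = 0 := by
  unfold pvInd
  rw [List.drop_eq_nil_of_le h]
  simp [pvOc]

-- stabilised indicators: slices reaching past the end are the full suffix
lemma pvInd_full (arr : List Int) (i k : Nat) (h : arr.length ≤ i + k + 1) :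
    pvInd arr i k = if pvOc (arr.drop i) % 2 = 0 ∧ pvOc (arr.drop i) ≠ 0 then 1 else 0 := by
  unfold pvInd
  rw [List.take_of_length_le (by rw [List.length_drop]; omega)]

-- for N beyond the list, the extra index pairs each count the same full suffixes
lemma pvSum_gt (arr : List Int) (N : Nat) (h : arr.length < N) :
    (∑ i ∈ Finset.range N, ∑ k ∈ Finset.range (N - i), pvInd arr i k)
      = pvCntA arr + (N - arr.length) * pvS arr := by
  have houter : (∑ i ∈ Finset.range N, ∑ k ∈ Finset.range (N - i), pvInd arr i k)
      = ∑ i ∈ Finset.range arr.length, ∑ k ∈ Finset.range (N - i), pvInd arr i k := by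
    symm
    apply Finset.sum_subset (by intro x hx; simp only [Finset.mem_range] at hx ⊢; omega)
    intro i _ hni
    have hi : arr.length ≤ i := by
      have := Finset.mem_range.not.mp hni; omega
    exact Finset.sum_eq_zero (fun k _ => pvInd_zero arr i k hi)
  rw [houter]
  have hinner : ∀ i ∈ Finset.range arr.length,
      (∑ k ∈ Finset.range (N - i), pvInd arr i k)
        = (∑ k ∈ Finset.range (arr.length - i), pvInd arr i k)
          + (N - arr.length) *
              (if pvOc (arr.drop i) % 2 = 0 ∧ pvOc (arr.drop i) ≠ 0 then 1 else 0) := by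
    intro i hi
    have hi' : i < arr.length := Finset.mem_range.mp hi
    rw [Finset.range_eq_Ico,
        ← Finset.sum_Ico_consecutive (fun k => pvInd arr i k)
            (Nat.zero_le (arr.length - i)) (by omega : arr.length - i ≤ N - i)]
    congr 1
    have hconst : ∀ k ∈ Finset.Ico (arr.length - i) (N - i),
        pvInd arr i k = (if pvOc (arr.drop i) % 2 = 0 ∧ pvOc (arr.drop i) ≠ 0 then 1 else 0) := by
      intro k hk
      have hk' := Finset.mem_Ico.mp hk
      exact pvInd_full arr i k (by omega)
    rw [Finset.sum_congr rfl hconst, Finset.sum_const, Nat.card_Ico, smul_eq_mul]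
    congr 1
    omega
  rw [Finset.sum_congr rfl hinner, Finset.sum_add_distrib, ← Finset.mul_sum]
  congr 1
  have := pvSum_le arr arr.length (le_refl _)
  rw [List.take_length] at this
  exact this

-- even-count subarrays split into the nonzero ones (A's) and the zero ones
lemma pvSplit (l : List Int) : pvCntA l + pvZo l = pvEp l := by
  unfold pvCntA pvZo pvEp
  rw [← Finset.sum_add_distrib]
  apply Finset.sum_congr rfl
  intro j _
  rw [← Finset.sum_add_distrib]
  apply Finset.sum_congr rfl
  intro i hi
  have hij : i ≤ j := le_of_lt (Finset.mem_range.mp hi)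
  have htake : (l.take j).take i = l.take i := by
    rw [List.take_take]; congr 1; omega
  have heq := pvEven_iff (l.take j) i
  rw [htake] at heq
  by_cases h0 : pvOc ((l.take j).drop i) = 0
  · have he : pvOc ((l.take j).drop i) % 2 = 0 := by omega
    rw [if_neg (by tauto), if_pos h0, if_pos (heq.mp he)]
  · by_cases he : pvOc ((l.take j).drop i) % 2 = 0
    · rw [if_pos ⟨he, h0⟩, if_neg h0, if_pos (heq.mp he)]
    · rw [if_neg (by tauto), if_neg h0, if_neg (fun h => he (heq.mpr h))]

-- snoc recurrences for B's closed-form state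
lemma pvRun_snoc_even (l : List Int) (x : Int) (hd : (2 : Int) ∣ x) :
    pvRun (l ++ [x]) = pvRun l + 1 := by
  unfold pvRun; rw [List.reverse_append]; simp [hd]

lemma pvRun_snoc_odd (l : List Int) (x : Int) (hm1 : x % 2 = 1) :
    pvRun (l ++ [x]) = 0 := by
  unfold pvRun; rw [List.reverse_append]; simp [hm1]

lemma pvTake_whole (l : List Int) (x : Int) : (l ++ [x]).take (l.length + 1) = l ++ [x] := by
  apply List.take_of_length_le; simp

lemma pvPc_snoc (p : Nat) (l : List Int) (x : Int) :
    pvPc p (l ++ [x]) = pvPc p l + (if pvPar (l ++ [x]) = p then 1 else 0) := by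
  unfold pvPc
  rw [show (l ++ [x]).length = l.length + 1 by simp, Finset.sum_range_succ, pvTake_whole]
  congr 1
  apply Finset.sum_congr rfl
  intro i hi
  rw [List.take_append_of_le_length (by have := Finset.mem_range.mp hi; omega)]

lemma pvEp_snoc (l : List Int) (x : Int) :
    pvEp (l ++ [x]) = pvEp l + pvPc (pvPar (l ++ [x])) l := by
  unfold pvEp pvPc
  rw [show (l ++ [x]).length = l.length + 1 by simp, Finset.sum_range_succ, pvTake_whole]
  congr 1
  · apply Finset.sum_congr rfl
    intro j hj
    apply Finset.sum_congr rfl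
    intro i hi
    have hj' : j ≤ l.length := by have := Finset.mem_range.mp hj; omega
    have hi' : i ≤ l.length := by have := Finset.mem_range.mp hi; omega
    rw [List.take_append_of_le_length hi', List.take_append_of_le_length hj']
  · apply Finset.sum_congr rfl
    intro i hi
    rw [List.take_append_of_le_length (by have := Finset.mem_range.mp hi; omega)]

lemma pvZo_snoc (l : List Int) (x : Int) :
    pvZo (l ++ [x]) = pvZo l + pvRun (l ++ [x]) := by
  unfold pvZo
  rw [show (l ++ [x]).length = l.length + 1 by simp, Finset.sum_range_succ, pvTake_whole]
  have hz := pvZcount (l ++ [x])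
  rw [show (l ++ [x]).length = l.length + 1 by simp] at hz
  rw [hz]
  congr 1
  apply Finset.sum_congr rfl
  intro j hj
  have hj' : j ≤ l.length := by have := Finset.mem_range.mp hj; omega
  rw [List.take_append_of_le_length hj']

-- B's loop invariant: the fold state is the six closed-form quantities
lemma pvB_inv (l : List Int) :
    l.foldl magicalSubarraysAltStep (0, 0, 1, 0, 0, 0)
      = ((pvPar l : Int), (pvRun l : Int), (pvPc 0 l : Int), (pvPc 1 l : Int),
         (pvEp l : Int), (pvZo l : Int)) := by
  induction l using List.reverseRecOn with
  | nil => simp [pvPar, pvOc, pvRun, pvPc, pvEp, pvZo]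
  | append_singleton l x ih =>
    rw [List.foldl_append, ih, List.foldl_cons, List.foldl_nil]
    have hpc0 := pvPc_snoc 0 l x
    have hpc1 := pvPc_snoc 1 l x
    have hep := pvEp_snoc l x
    have hzo := pvZo_snoc l x
    have hplt := pvPar_lt_two l
    rcases Decidable.em (PySem.Int.mod x 2 = 0) with hx | hx
    · -- even x
      have hd : (2 : Int) ∣ x := (PySem.Int.mod_eq_zero_iff_dvd x 2).mp hx
      have hx0 : pvOc [x] = 0 := by unfold pvOc; simp [hd]
      have hpar : pvPar (l ++ [x]) = pvPar l := by
        simp [pvPar, pvOc_append, hx0]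
      have hrun := pvRun_snoc_even l x hd
      rw [magicalSubarraysAltStep, if_neg (by simpa using hx)]
      dsimp only
      by_cases hp : pvPar l = 0
      · have hnp : pvPar (l ++ [x]) = 0 := by omega
        have e0 : pvPc 0 (l ++ [x]) = pvPc 0 l + 1 := by rw [hpc0, hnp]; norm_num
        have e1 : pvPc 1 (l ++ [x]) = pvPc 1 l := by rw [hpc1, hnp]; norm_num
        have e2 : pvEp (l ++ [x]) = pvEp l + pvPc 0 l := by rw [hep, hnp]
        rw [hp, if_pos (by norm_num)]
        simp only [Prod.mk.injEq]
        refine ⟨by omega, by omega, by omega, by omega, by omega, by omega⟩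
      · have hp1 : pvPar l = 1 := by omega
        have hnp : pvPar (l ++ [x]) = 1 := by omega
        have e0 : pvPc 0 (l ++ [x]) = pvPc 0 l := by rw [hpc0, hnp]; norm_num
        have e1 : pvPc 1 (l ++ [x]) = pvPc 1 l + 1 := by rw [hpc1, hnp]; norm_num
        have e2 : pvEp (l ++ [x]) = pvEp l + pvPc 1 l := by rw [hep, hnp]
        rw [hp1, if_neg (by norm_num)]
        simp only [Prod.mk.injEq]
        refine ⟨by omega, by omega, by omega, by omega, by omega, by omega⟩
    · -- odd x
      have hd : ¬ (2 : Int) ∣ x := fun h => hx ((PySem.Int.mod_eq_zero_iff_dvd x 2).mpr h)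
      have hm1 : x % 2 = 1 := by
        have := Int.emod_two_eq x
        rcases this with h | h
        · exact absurd (Int.dvd_of_emod_eq_zero h) hd
        · exact h
      have hx1 : pvOc [x] = 1 := by unfold pvOc; simp [hm1]
      have hpar : pvPar (l ++ [x]) = 1 - pvPar l := by
        have : pvOc (l ++ [x]) = pvOc l + 1 := by rw [pvOc_append, hx1]
        simp only [pvPar] at *
        omega
      have hrun := pvRun_snoc_odd l x hm1
      rw [magicalSubarraysAltStep, if_pos (by simpa using hx)]
      dsimp only
      by_cases hp : pvPar l = 0
      · have hnp : pvPar (l ++ [x]) = 1 := by omega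
        have e0 : pvPc 0 (l ++ [x]) = pvPc 0 l := by rw [hpc0, hnp]; norm_num
        have e1 : pvPc 1 (l ++ [x]) = pvPc 1 l + 1 := by rw [hpc1, hnp]; norm_num
        have e2 : pvEp (l ++ [x]) = pvEp l + pvPc 1 l := by rw [hep, hnp]
        rw [hp, if_neg (by norm_num)]
        simp only [Prod.mk.injEq]
        refine ⟨by omega, by omega, by omega, by omega, by omega, by omega⟩
      · have hp1 : pvPar l = 1 := by omega
        have hnp : pvPar (l ++ [x]) = 0 := by omega
        have e0 : pvPc 0 (l ++ [x]) = pvPc 0 l + 1 := by rw [hpc0, hnp]; norm_num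
        have e1 : pvPc 1 (l ++ [x]) = pvPc 1 l := by rw [hpc1, hnp]; norm_num
        have e2 : pvEp (l ++ [x]) = pvEp l + pvPc 0 l := by rw [hep, hnp]
        rw [hp1, if_pos (by norm_num)]
        simp only [Prod.mk.injEq]
        refine ⟨by omega, by omega, by omega, by omega, by omega, by omega⟩

-- B's break loop is a fold over the clamped prefix
lemma pvAltLoop_eq (n : Int) (l : List Int) :
    ∀ (i : Int) (s : Int × Int × Int × Int × Int × Int),
      magicalSubarraysAltLoop n l i s = (l.take (n - i).toNat).foldl magicalSubarraysAltStep s := by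
  induction l with
  | nil => intro i s; simp [magicalSubarraysAltLoop]
  | cons x xs ih =>
    intro i s
    rw [magicalSubarraysAltLoop]
    by_cases h : i ≥ n
    · rw [if_pos h, show (n - i).toNat = 0 from by omega, List.take_zero, List.foldl_nil]
    · rw [if_neg h, show (n - i).toNat = (n - (i + 1)).toNat + 1 from by omega,
          List.take_succ_cons, List.foldl_cons, ih]

-- B's result as the closed-form quantities of the clamped prefix
lemma pvB_eq (n : Int) (arr : List Int) :
    magicalSubarrays_alt n arr
      = ((pvEp (arr.take n.toNat) : Nat) : Int) - ((pvZo (arr.take n.toNat) : Nat) : Int) := by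
  unfold magicalSubarrays_alt
  rw [pvAltLoop_eq, show (n - 0 : Int) = n from by ring, pvB_inv]

-- B equals A's intended count over the clamped prefix
lemma pvB_cntA (n : Int) (arr : List Int) :
    magicalSubarrays_alt n arr = ((pvCntA (arr.take n.toNat) : Nat) : Int) := by
  rw [pvB_eq]
  have := pvSplit (arr.take n.toNat)
  omega

-- with no qualifying suffix, the suffix count is zero
lemma pvS_zero (arr : List Int)
    (h : ¬ ∃ i < arr.length, pvOc (arr.drop i) % 2 = 0 ∧ pvOc (arr.drop i) ≠ 0) :
    pvS arr = 0 := by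
  apply Finset.sum_eq_zero
  intro i hi
  rw [if_neg]
  intro hc
  exact h ⟨i, Finset.mem_range.mp hi, hc⟩

-- with a qualifying suffix, the suffix count is positive
lemma pvS_pos (arr : List Int)
    (h : ∃ i < arr.length, pvOc (arr.drop i) % 2 = 0 ∧ pvOc (arr.drop i) ≠ 0) :
    1 ≤ pvS arr := by
  obtain ⟨i, hi, hc⟩ := h
  unfold pvS
  have hle := Finset.single_le_sum
    (f := fun j => if pvOc (arr.drop j) % 2 = 0 ∧ pvOc (arr.drop j) ≠ 0 then 1 else 0)
    (fun j _ => Nat.zero_le _) (Finset.mem_range.mpr hi)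
  simp only [] at hle
  rw [if_pos hc] at hle
  exact hle

-- ===== VERDICT (by name: the statement is the Claim_ definition above) =====
theorem magicalSubarrays_spec : Claim_unchanged_magicalSubarrays := by
  intro n arr _
  intro hnd
  rw [pvB_cntA]
  rcases (by omega : n ≤ 0 ∨ 0 < n) with hn | hn
  · -- n ≤ 0: A's loops are empty and B scans the empty prefix
    have hA : magicalSubarrays n arr = 0 := by
      unfold magicalSubarrays
      rw [PySem.List.pyRange_one_eq_nil hn]
      rfl
    rw [hA, show n.toNat = 0 from by omega, List.take_zero]
    norm_num [pvCntA]
  · have hn' : n = ((n.toNat : Nat) : Int) := by omega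
    set N := n.toNat with hN
    rcases (by omega : N ≤ arr.length ∨ arr.length < N) with hle | hgt
    · rw [hn', pvA_sum arr N, pvSum_le arr N hle]
    · -- n beyond the list: outside D_ there is no qualifying suffix, so no inflation
      have hnS : ¬ ∃ i < arr.length, pvOc (arr.drop i) % 2 = 0 ∧ pvOc (arr.drop i) ≠ 0 := by
        intro hex
        exact hnd ⟨by omega, hex⟩
      rw [hn', pvA_sum arr N, pvSum_gt arr N hgt, pvS_zero arr hnS,
          List.take_of_length_le (by omega : arr.length ≤ N)]
      norm_num

theorem magicalSubarrays_changed : Claim_changed_magicalSubarrays := by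
  unfold Claim_changed_magicalSubarrays; decide

theorem magicalSubarrays_tight : Claim_exact_magicalSubarrays := by
  intro n arr _ hd
  obtain ⟨hgt, hex⟩ := hd
  have hgt' : arr.length < n.toNat := by omega
  have hn' : n = ((n.toNat : Nat) : Int) := by omega
  have hA := pvA_sum arr n.toNat
  rw [← hn'] at hA
  rw [hA, pvSum_gt arr n.toNat hgt', pvB_cntA,
      List.take_of_length_le (le_of_lt hgt')]
  have hS := pvS_pos arr hex
  have hNm : 1 ≤ n.toNat - arr.length := by omega
  have : 1 ≤ (n.toNat - arr.length) * pvS arr := Nat.one_le_iff_ne_zero.mpr (by positivity)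
  push_cast
  omega
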